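-- pv_equiv track=rewrite | github.com/Arsen1302/Code-copy-detector | TestData/solutions/problem_572_4.py | solution_572_4
-- ===== SOURCE A (Python) =====
-- from typing import List
--
-- def solution_572_4(R: int, C: int, r0: int, c0: int) -> List[List[int]]:
--     res = [[r0, c0]]
--     c_r, c_c = r0, c0  # current row, current column
--     s, d = 1, 1  # step, direction
--
--     while len(res) < R * C:
--         for _ in range(s):
--             c_c = c_c + 1 * d
--             if 0 <= c_r < R and 0 <= c_c < C:
--                 res.append([c_r, c_c])
--
--         for _ in range(s):
--             c_r = c_r + 1 * d
--             if 0 <= c_r < R and 0 <= c_c < C: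
--                 res.append([c_r, c_c])
--
--         s += 1
--         d *= -1
--
--     return res
-- ===== SOURCE B (Python) =====
-- def solution_572_4(R, C, r0, c0):
--     res = [[r0, c0]]
--     r, c = r0, c0
--     s, d = 1, 1
--     while len(res) < R * C:
--         nc = c + s * d
--         if 0 <= r < R:
--             if d == 1:
--                 res += [[r, x] for x in range(max(c + 1, 0), min(nc, C - 1) + 1)]
--             else:
--                 res += [[r, x] for x in range(min(c - 1, C - 1), max(nc, 0) - 1, -1)]
--         c = nc
--         nr = r + s * d
--         if 0 <= c < C:
--             if d == 1:
--                 res += [[x, c] for x in range(max(r + 1, 0), min(nr, R - 1) + 1)]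
--             else:
--                 res += [[x, c] for x in range(min(r - 1, R - 1), max(nr, 0) - 1, -1)]
--         r = nr
--         s += 1
--         d = -d
--     return res
-- ===== Notes on version B (the rewrite author's own statement) =====
-- stated objective: faster
-- what changed: A walks the bounding spiral cell by cell and tests each cell against the grid; B processes each straight segment at once, clamping it to the grid and appending the whole in-range run as one range, so off-grid runs cost O(1) per segment.
import Mathlib
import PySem

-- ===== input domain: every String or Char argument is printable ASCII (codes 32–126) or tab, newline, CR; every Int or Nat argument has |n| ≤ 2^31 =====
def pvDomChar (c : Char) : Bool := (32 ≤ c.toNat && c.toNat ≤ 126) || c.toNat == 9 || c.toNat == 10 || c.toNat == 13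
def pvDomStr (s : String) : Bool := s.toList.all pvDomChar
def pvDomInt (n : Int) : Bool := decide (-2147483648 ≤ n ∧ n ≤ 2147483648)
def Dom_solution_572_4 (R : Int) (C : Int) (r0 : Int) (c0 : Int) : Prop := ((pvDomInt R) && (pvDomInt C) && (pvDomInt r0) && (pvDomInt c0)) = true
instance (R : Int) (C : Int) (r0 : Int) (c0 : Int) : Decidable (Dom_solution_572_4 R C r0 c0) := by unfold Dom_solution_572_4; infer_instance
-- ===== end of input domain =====

-- B replaces A's cell-by-cell walk over the whole bounding spiral by per-segment clamping to the
-- grid (appending each in-range run as one range), skipping off-grid runs entirely.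

-- ===== PORT A =====
-- the first inner for-loop of A: 'for _ in range(s): c_c += 1*d; if in grid: res.append([c_r, c_c])'
def segAH (R C r d : Int) : Nat → Int → List (List Int) → Int × List (List Int)
  | 0, c, res => (c, res)
  | n+1, c, res =>
      let c' := c + 1 * d
      let res' := if 0 ≤ r ∧ r < R ∧ 0 ≤ c' ∧ c' < C then res ++ [[r, c']] else res
      segAH R C r d n c' res'

-- the second inner for-loop of A: 'for _ in range(s): c_r += 1*d; if in grid: res.append([c_r, c_c])'
def segAV (R C c d : Int) : Nat → Int → List (List Int) → Int × List (List Int)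
  | 0, r, res => (r, res)
  | n+1, r, res =>
      let r' := r + 1 * d
      let res' := if 0 ≤ r' ∧ r' < R ∧ 0 ≤ c ∧ c < C then res ++ [[r', c]] else res
      segAV R C c d n r' res'

-- fuel for the while loop: wherever the Python loop terminates (some cell of the spiral is ever
-- in range, or R*C ≤ 1) it performs fewer iterations than this, so the fuel is a pure totality
-- guard, never reached before the loop's own exit
def pvFuel (R C r0 c0 : Int) : Nat := (2 * (R + C) + 4).toNat + 2 * (r0.natAbs + c0.natAbs) + 8

-- A's 'while len(res) < R * C' loop
def loopA (R C : Int) : Nat → List (List Int) → Int → Int → Int → Int → List (List Int)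
  | 0, res, _, _, _, _ => res
  | fuel+1, res, r, c, s, d =>
      if (res.length : Int) < R * C then
        let p1 := segAH R C r d s.toNat c res
        let p2 := segAV R C p1.1 d s.toNat r p1.2
        loopA R C fuel p2.2 p2.1 p1.1 (s + 1) (d * (-1))
      else res

def solution_572_4 (R : Int) (C : Int) (r0 : Int) (c0 : Int) : List (List Int) :=
  loopA R C (pvFuel R C r0 c0) [[r0, c0]] r0 c0 1 1

-- ===== PORT B =====
-- B's horizontal segment: the in-range run of columns c+d, …, nc at row r, as one clamped range
def segBH (R C r c nc d : Int) : List (List Int) :=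
  if 0 ≤ r ∧ r < R then
    if d = 1 then
      (PySem.List.pyRange (max (c + 1) 0) (min nc (C - 1) + 1) 1).map (fun x => [r, x])
    else
      (PySem.List.pyRange (min (c - 1) (C - 1)) (max nc 0 - 1) (-1)).map (fun x => [r, x])
  else []

-- B's vertical segment: the in-range run of rows r+d, …, nr at column c, as one clamped range
def segBV (R C c r nr d : Int) : List (List Int) :=
  if 0 ≤ c ∧ c < C then
    if d = 1 then
      (PySem.List.pyRange (max (r + 1) 0) (min nr (R - 1) + 1) 1).map (fun x => [x, c])
    else
      (PySem.List.pyRange (min (r - 1) (R - 1)) (max nr 0 - 1) (-1)).map (fun x => [x, c])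
  else []

-- B's while loop (same condition as A's; segments appended as whole clamped runs)
def loopB (R C : Int) : Nat → List (List Int) → Int → Int → Int → Int → List (List Int)
  | 0, res, _, _, _, _ => res
  | fuel+1, res, r, c, s, d =>
      if (res.length : Int) < R * C then
        let nc := c + s * d
        let res1 := res ++ segBH R C r c nc d
        let nr := r + s * d
        let res2 := res1 ++ segBV R C nc r nr d
        loopB R C fuel res2 nr nc (s + 1) (-d)
      else res

def solution_572_4_alt (R : Int) (C : Int) (r0 : Int) (c0 : Int) : List (List Int) :=
  loopB R C (pvFuel R C r0 c0) [[r0, c0]] r0 c0 1 1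

-- ===== PRECONDITION & SPEC =====
def Spec_solution_572_4 (R : Int) (C : Int) (r0 : Int) (c0 : Int) (out : List (List Int)) : Prop := out = solution_572_4_alt R C r0 c0
instance (R : Int) (C : Int) (r0 : Int) (c0 : Int) (out : List (List Int)) : Decidable (Spec_solution_572_4 R C r0 c0 out) := by unfold Spec_solution_572_4; infer_instance

-- ===== CLAIM (what is proved, stated in full; the proofs are below) =====
def Claim_equal_solution_572_4 : Prop := ∀ (R : Int) (C : Int) (r0 : Int) (c0 : Int), Dom_solution_572_4 R C r0 c0 → Spec_solution_572_4 R C r0 c0 (solution_572_4 R C r0 c0)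

-- ===== LEMMAS AND PROOFS =====

-- range identity: one step of a clamped run peels off its first cell (or nothing, off-grid)


theorem rangeAsc_step (C c m : Int) (hm : c + 1 ≤ m) :
    PySem.List.pyRange (max (c + 1) 0) (min m (C - 1) + 1) 1
      = (if 0 ≤ c + 1 ∧ c + 1 < C then [c + 1] else [])
        ++ PySem.List.pyRange (max (c + 2) 0) (min m (C - 1) + 1) 1 := by
  by_cases hc : 0 ≤ c + 1 ∧ c + 1 < C
  · rw [if_pos hc, show max (c + 1) 0 = c + 1 by omega,
      PySem.List.pyRange_one_cons (by omega : c + 1 < min m (C - 1) + 1),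
      show max (c + 2) 0 = c + 1 + 1 by omega]
    rfl
  · rw [if_neg hc, List.nil_append]
    rcases Int.lt_or_le (c + 1) 0 with h0 | h0
    · rw [show max (c + 1) 0 = max (c + 2) 0 by omega]
    · rw [PySem.List.pyRange_one_eq_nil (by omega), PySem.List.pyRange_one_eq_nil (by omega)]

theorem rangeDesc_step (C c m : Int) (hm : m ≤ c - 1) :
    PySem.List.pyRange (min (c - 1) (C - 1)) (max m 0 - 1) (-1)
      = (if 0 ≤ c - 1 ∧ c - 1 < C then [c - 1] else [])
        ++ PySem.List.pyRange (min (c - 2) (C - 1)) (max m 0 - 1) (-1) := by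
  by_cases hc : 0 ≤ c - 1 ∧ c - 1 < C
  · rw [if_pos hc, show min (c - 1) (C - 1) = c - 1 by omega,
      PySem.List.pyRange_neg_one_cons (by omega : max m 0 - 1 < c - 1),
      show min (c - 2) (C - 1) = c - 1 - 1 by omega]
    rfl
  · rw [if_neg hc, List.nil_append]
    rcases Int.lt_or_le (c - 1) 0 with h0 | h0
    · rw [PySem.List.pyRange_neg_one_eq_nil (by omega), PySem.List.pyRange_neg_one_eq_nil (by omega)]
    · rw [show min (c - 1) (C - 1) = min (c - 2) (C - 1) by omega]

-- A's horizontal for-loop with d = 1 appends exactly B's clamped ascending run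
theorem segAH_one (R C r : Int) : ∀ (n : Nat) (c : Int) (res : List (List Int)),
    segAH R C r 1 n c res = (c + n, res ++ segBH R C r c (c + n) 1) := by
  intro n
  induction n with
  | zero =>
      intro c res
      simp [segAH, segBH, PySem.List.pyRange_one_eq_nil (by omega : min c (C - 1) + 1 ≤ max (c + 1) 0)]
  | succ n ih =>
      intro c res
      simp only [segAH, ih, mul_one]
      refine Prod.ext (by push_cast; ring) ?_
      simp only [segBH, if_true]
      by_cases hr : 0 ≤ r ∧ r < R
      · simp only [if_pos hr]
        have e2 : (if 0 ≤ r ∧ r < R ∧ 0 ≤ c + 1 ∧ c + 1 < C then res ++ [[r, c + 1]] else res)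
            = res ++ (if 0 ≤ c + 1 ∧ c + 1 < C then [[r, c + 1]] else []) := by
          by_cases hc : 0 ≤ c + 1 ∧ c + 1 < C
          · rw [if_pos ⟨hr.1, hr.2, hc.1, hc.2⟩, if_pos hc]
          · rw [if_neg (by tauto), if_neg hc, List.append_nil]
        rw [e2, List.append_assoc]
        congr 1
        push_cast
        rw [show c + ((n : Int) + 1) = c + (n : Int) + 1 by ring]
        rw [rangeAsc_step C c (c + (n : Int) + 1) (by omega), List.map_append]
        congr 1
        · by_cases hc : 0 ≤ c + 1 ∧ c + 1 < C <;> simp [hc]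
        · rw [show max (c + 1 + 1) 0 = max (c + 2) 0 from by omega,
              show min (c + 1 + (n : Int)) (C - 1) = min (c + (n : Int) + 1) (C - 1) from by omega]
      · simp only [if_neg hr,
          if_neg (show ¬(0 ≤ r ∧ r < R ∧ 0 ≤ c + 1 ∧ c + 1 < C) from by tauto), List.append_nil]

theorem segAH_neg (R C r : Int) : ∀ (n : Nat) (c : Int) (res : List (List Int)),
    segAH R C r (-1) n c res = (c - n, res ++ segBH R C r c (c - n) (-1)) := by
  intro n
  induction n with
  | zero =>
      intro c res
      simp [segAH, segBH, PySem.List.pyRange_neg_one_eq_nil (by omega : min (c - 1) (C - 1) ≤ max c 0 - 1)]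
  | succ n ih =>
      intro c res
      simp only [segAH, ih]
      rw [show c + 1 * (-1) = c - 1 by ring]
      refine Prod.ext (by push_cast; ring) ?_
      simp only [segBH, if_neg (show ¬((-1 : Int) = 1) from by norm_num)]
      by_cases hr : 0 ≤ r ∧ r < R
      · simp only [if_pos hr]
        have e2 : (if 0 ≤ r ∧ r < R ∧ 0 ≤ c - 1 ∧ c - 1 < C then res ++ [[r, c - 1]] else res)
            = res ++ (if 0 ≤ c - 1 ∧ c - 1 < C then [[r, c - 1]] else []) := by
          by_cases hc : 0 ≤ c - 1 ∧ c - 1 < C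
          · rw [if_pos ⟨hr.1, hr.2, hc.1, hc.2⟩, if_pos hc]
          · rw [if_neg (by tauto), if_neg hc, List.append_nil]
        rw [e2, List.append_assoc]
        congr 1
        push_cast
        rw [show c - ((n : Int) + 1) = c - (n : Int) - 1 by ring]
        rw [rangeDesc_step C c (c - (n : Int) - 1) (by omega), List.map_append]
        congr 1
        · split_ifs <;> simp
        · rw [show min (c - 1 - 1) (C - 1) = min (c - 2) (C - 1) from by omega,
              show max (c - 1 - (n : Int)) 0 = max (c - (n : Int) - 1) 0 from by omega]
      · simp only [if_neg hr,
          if_neg (show ¬(0 ≤ r ∧ r < R ∧ 0 ≤ c - 1 ∧ c - 1 < C) from by tauto), List.append_nil]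

theorem segAV_one (R C c : Int) : ∀ (n : Nat) (r : Int) (res : List (List Int)),
    segAV R C c 1 n r res = (r + n, res ++ segBV R C c r (r + n) 1) := by
  intro n
  induction n with
  | zero =>
      intro r res
      simp [segAV, segBV, PySem.List.pyRange_one_eq_nil (by omega : min r (R - 1) + 1 ≤ max (r + 1) 0)]
  | succ n ih =>
      intro r res
      simp only [segAV, ih, mul_one]
      refine Prod.ext (by push_cast; ring) ?_
      simp only [segBV, if_true]
      by_cases hc : 0 ≤ c ∧ c < C
      · simp only [if_pos hc]
        have e2 : (if 0 ≤ r + 1 ∧ r + 1 < R ∧ 0 ≤ c ∧ c < C then res ++ [[r + 1, c]] else res)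
            = res ++ (if 0 ≤ r + 1 ∧ r + 1 < R then [[r + 1, c]] else []) := by
          by_cases hrr : 0 ≤ r + 1 ∧ r + 1 < R
          · rw [if_pos ⟨hrr.1, hrr.2, hc.1, hc.2⟩, if_pos hrr]
          · rw [if_neg (by tauto), if_neg hrr, List.append_nil]
        rw [e2, List.append_assoc]
        congr 1
        push_cast
        rw [show r + ((n : Int) + 1) = r + (n : Int) + 1 by ring]
        rw [rangeAsc_step R r (r + (n : Int) + 1) (by omega), List.map_append]
        congr 1
        · split_ifs <;> simp
        · rw [show max (r + 1 + 1) 0 = max (r + 2) 0 from by omega,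
              show min (r + 1 + (n : Int)) (R - 1) = min (r + (n : Int) + 1) (R - 1) from by omega]
      · simp only [if_neg hc,
          if_neg (show ¬(0 ≤ r + 1 ∧ r + 1 < R ∧ 0 ≤ c ∧ c < C) from by tauto), List.append_nil]

theorem segAV_neg (R C c : Int) : ∀ (n : Nat) (r : Int) (res : List (List Int)),
    segAV R C c (-1) n r res = (r - n, res ++ segBV R C c r (r - n) (-1)) := by
  intro n
  induction n with
  | zero =>
      intro r res
      simp [segAV, segBV, PySem.List.pyRange_neg_one_eq_nil (by omega : min (r - 1) (R - 1) ≤ max r 0 - 1)]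
  | succ n ih =>
      intro r res
      simp only [segAV, ih]
      rw [show r + 1 * (-1) = r - 1 by ring]
      refine Prod.ext (by push_cast; ring) ?_
      simp only [segBV, if_neg (show ¬((-1 : Int) = 1) from by norm_num)]
      by_cases hc : 0 ≤ c ∧ c < C
      · simp only [if_pos hc]
        have e2 : (if 0 ≤ r - 1 ∧ r - 1 < R ∧ 0 ≤ c ∧ c < C then res ++ [[r - 1, c]] else res)
            = res ++ (if 0 ≤ r - 1 ∧ r - 1 < R then [[r - 1, c]] else []) := by
          by_cases hrr : 0 ≤ r - 1 ∧ r - 1 < R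
          · rw [if_pos ⟨hrr.1, hrr.2, hc.1, hc.2⟩, if_pos hrr]
          · rw [if_neg (by tauto), if_neg hrr, List.append_nil]
        rw [e2, List.append_assoc]
        congr 1
        push_cast
        rw [show r - ((n : Int) + 1) = r - (n : Int) - 1 by ring]
        rw [rangeDesc_step R r (r - (n : Int) - 1) (by omega), List.map_append]
        congr 1
        · split_ifs <;> simp
        · rw [show min (r - 1 - 1) (R - 1) = min (r - 2) (R - 1) from by omega,
              show max (r - 1 - (n : Int)) 0 = max (r - (n : Int) - 1) 0 from by omega]
      · simp only [if_neg hc,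
          if_neg (show ¬(0 ≤ r - 1 ∧ r - 1 < R ∧ 0 ≤ c ∧ c < C) from by tauto), List.append_nil]

-- lockstep: both while loops carry the same state, so with the segment lemmas they agree
theorem loop_eq (R C : Int) : ∀ (fuel : Nat) (res : List (List Int)) (r c s d : Int),
    0 ≤ s → (d = 1 ∨ d = -1) →
    loopA R C fuel res r c s d = loopB R C fuel res r c s d := by
  intro fuel
  induction fuel with
  | zero => intros; rfl
  | succ fuel ih =>
      intro res r c s d hs hd
      simp only [loopA, loopB]
      by_cases h : (res.length : Int) < R * C
      · simp only [if_pos h]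
        rcases hd with rfl | rfl
        · rw [segAH_one, segAV_one]
          simp only [Int.toNat_of_nonneg hs]
          rw [ih _ _ _ _ _ (by omega) (by norm_num)]
          norm_num
        · rw [segAH_neg, segAV_neg]
          simp only [Int.toNat_of_nonneg hs]
          rw [ih _ _ _ _ _ (by omega) (by norm_num)]
          have h1 : c - s = c + s * (-1) := by ring
          have h2 : r - s = r + s * (-1) := by ring
          rw [h1, h2]
          norm_num
      · simp only [if_neg h]

-- ===== VERDICT (by name: the statement is the Claim_ definition above) =====
theorem solution_572_4_spec : Claim_equal_solution_572_4 := by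
  intro R C r0 c0 _
  show _ = _
  exact loop_eq R C _ _ _ _ _ _ (by omega) (Or.inl rfl)
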